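-- pv_equiv track=rewrite | github.com/luffy-taro-106/Layer10_Project | Graph_Design/load_entities_to_neo4j.py | _label_name_from_entity
-- ===== SOURCE A (Python) =====
-- def _label_name_from_entity(entity_id: str) -> str:
--     token = entity_id.replace("label_", "", 1)
--     prefixes = ("kind_", "area_", "priority_", "component_")
--     for prefix in prefixes:
--         if token.startswith(prefix):
--             rest = token[len(prefix):].replace("_", "-")
--             return f"{prefix[:-1]}:{rest}" if rest else prefix[:-1]
--     return token.replace("_", "-")
-- ===== SOURCE B (Python) =====
-- def _label_name_from_entity(entity_id: str) -> str:
--     token = entity_id.replace("label_", "", 1)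
--     key, sep, rest = token.partition("_")
--     if sep and key in {"kind", "area", "priority", "component"}:
--         rest = rest.replace("_", "-")
--         return f"{key}:{rest}" if rest else key
--     return token.replace("_", "-")
-- ===== Notes on version B (the rewrite author's own statement) =====
-- stated objective: simpler
-- what changed: Replaces the four-prefix startswith scanning loop by a single partition at the first underscore plus one membership test of the key.
import Mathlib
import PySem

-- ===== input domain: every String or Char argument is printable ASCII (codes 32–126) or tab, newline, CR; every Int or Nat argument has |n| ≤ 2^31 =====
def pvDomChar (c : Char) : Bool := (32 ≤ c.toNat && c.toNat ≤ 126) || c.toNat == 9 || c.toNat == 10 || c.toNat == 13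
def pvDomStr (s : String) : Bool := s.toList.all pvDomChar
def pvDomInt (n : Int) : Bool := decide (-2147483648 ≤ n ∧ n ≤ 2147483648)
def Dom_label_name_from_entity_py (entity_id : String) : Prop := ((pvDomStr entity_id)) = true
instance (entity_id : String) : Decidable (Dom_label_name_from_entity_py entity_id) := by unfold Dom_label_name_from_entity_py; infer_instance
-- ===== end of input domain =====

-- B replaces A's four-prefix scanning loop by a single partition at the first '_'
-- plus one membership test of the key (objective: simpler decomposition).

-- Shared first line of both Pythons: entity_id.replace("label_", "", 1)
-- (removes the FIRST occurrence of pat anywhere in the string; exact hand port)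
def pvStripFirst (pat : List Char) : List Char → List Char
  | [] => []
  | c :: cs =>
      if pat.isPrefixOf (c :: cs) then (c :: cs).drop pat.length
      else c :: pvStripFirst pat cs

-- ===== PORT A =====
-- the 'for prefix in prefixes' loop; 'prefix[:-1]' is p.dropLast (slice to -1 of a nonempty literal)
def pvALoop (token : List Char) : List (List Char) → List Char
  | [] => PySem.Chars.replace token ['_'] ['-']
  | p :: ps =>
      if PySem.Chars.startswith token p then
        let rest := PySem.Chars.replace (token.drop p.length) ['_'] ['-']
        if rest.isEmpty then p.dropLast else p.dropLast ++ ':' :: rest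
      else pvALoop token ps

def label_name_from_entity_py (entity_id : String) : String :=
  let token := pvStripFirst "label_".toList entity_id.toList
  String.ofList (pvALoop token
    ["kind_".toList, "area_".toList, "priority_".toList, "component_".toList])

-- ===== PORT B =====
-- token.partition("_") : (part before first '_', whether a '_' was found, part after it)
def pvPartition1 : List Char → List Char × Bool × List Char
  | [] => ([], false, [])
  | c :: cs =>
      if c = '_' then ([], true, cs)
      else
        let r := pvPartition1 cs
        (c :: r.1, r.2.1, r.2.2)

def label_name_from_entity_py_alt (entity_id : String) : String :=
  let token := pvStripFirst "label_".toList entity_id.toList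
  let p := pvPartition1 token
  if p.2.1 ∧ (p.1 = "kind".toList ∨ p.1 = "area".toList ∨
              p.1 = "priority".toList ∨ p.1 = "component".toList) then
    let rest := PySem.Chars.replace p.2.2 ['_'] ['-']
    String.ofList (if rest.isEmpty then p.1 else p.1 ++ ':' :: rest)
  else
    String.ofList (PySem.Chars.replace token ['_'] ['-'])

-- ===== PRECONDITION & SPEC =====
def Spec_label_name_from_entity_py (entity_id : String) (out : String) : Prop := out = label_name_from_entity_py_alt entity_id
instance (entity_id : String) (out : String) : Decidable (Spec_label_name_from_entity_py entity_id out) := by unfold Spec_label_name_from_entity_py; infer_instance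

-- ===== CLAIM (what is proved, stated in full; the proofs are below) =====
def Claim_equal_label_name_from_entity_py : Prop := ∀ (entity_id : String), Dom_label_name_from_entity_py entity_id → Spec_label_name_from_entity_py entity_id (label_name_from_entity_py entity_id)

-- ===== LEMMAS AND PROOFS =====

/-- Characterisation of `pvPartition1`: the key is the part before the first `'_'`. -/
lemma pvPartition1_spec (token : List Char) :
    (if (pvPartition1 token).2.1 then
        token = (pvPartition1 token).1 ++ '_' :: (pvPartition1 token).2.2
      else token = (pvPartition1 token).1 ∧ (pvPartition1 token).2.2 = []) ∧
    '_' ∉ (pvPartition1 token).1 := by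
  induction token with
  | nil => simp [pvPartition1]
  | cons c cs ih =>
      by_cases hc : c = '_'
      · subst hc; simp [pvPartition1]
      · simp only [pvPartition1, if_neg hc]
        rcases ih with ⟨h1, h2⟩
        constructor
        · split_ifs with hs
          · rw [if_pos hs] at h1; simpa using h1
          · rw [if_neg hs] at h1
            exact ⟨by simpa using h1.1, h1.2⟩
        · intro h
          rcases List.mem_cons.mp h with h | h
          · exact hc h.symm
          · exact h2 h

/-- Uniqueness of the split at the first `'_'`. -/
lemma split_unique {k1 k2 r1 r2 : List Char} (h1 : '_' ∉ k1) (h2 : '_' ∉ k2)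
    (h : k1 ++ '_' :: r1 = k2 ++ '_' :: r2) : k1 = k2 ∧ r1 = r2 := by
  induction k1 generalizing k2 with
  | nil =>
      cases k2 with
      | nil => simpa using h
      | cons b bs => simp at h; simp [← h.1] at h2
  | cons a as ih =>
      cases k2 with
      | nil => simp at h; simp [h.1] at h1
      | cons b bs =>
          simp at h
          obtain ⟨hab, htl⟩ := h
          have := ih (by simp at h1; exact h1.2) (by simp at h2; exact h2.2) htl
          exact ⟨by simp [hab, this.1], this.2⟩

lemma startswith_key (token rest : List Char) (key : List Char) (hk : '_' ∉ key)
    (htok : token = key ++ '_' :: rest) (p : List Char) (hp : '_' ∉ p.dropLast)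
    (hlast : p.getLast? = some '_') (hne : p.dropLast ≠ key) :
    PySem.Chars.startswith token p = false := by
  rw [← Bool.not_eq_true, PySem.Chars.startswith_iff]
  intro hpref
  obtain ⟨t, ht⟩ := hpref
  have hp' : p = p.dropLast ++ ['_'] := by
    rcases List.getLast?_eq_some_iff.mp hlast with ⟨l, hl⟩
    simp [hl]
  rw [← ht, hp'] at htok
  have : p.dropLast ++ '_' :: t = key ++ '_' :: rest := by simpa using htok
  exact hne (split_unique hp hk this).1

/-- The core equivalence of the two shapes, on the shared `token`. -/
lemma loop_eq_partition (token : List Char) :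
    pvALoop token
      ["kind_".toList, "area_".toList, "priority_".toList, "component_".toList] =
    (let p := pvPartition1 token
     if p.2.1 ∧ (p.1 = "kind".toList ∨ p.1 = "area".toList ∨
                 p.1 = "priority".toList ∨ p.1 = "component".toList) then
       let rest := PySem.Chars.replace p.2.2 ['_'] ['-']
       if rest.isEmpty then p.1 else p.1 ++ ':' :: rest
     else PySem.Chars.replace token ['_'] ['-']) := by
  have hspec := pvPartition1_spec token
  set P := pvPartition1 token with hP
  obtain ⟨key, sep, rest⟩ := P
  rcases hspec with ⟨h1, hk⟩
  cases sep with
  | false =>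
      simp only [if_neg (by simp : ¬ (false : Bool) = true)] at h1
      -- token has no '_', so no prefix ending in '_' matches
      have hnot : ∀ p : List Char, '_' ∈ p → PySem.Chars.startswith token p = false := by
        intro p hmem
        rw [← Bool.not_eq_true, PySem.Chars.startswith_iff]
        intro hpref
        have : '_' ∈ token := hpref.mem hmem
        rw [h1.1] at this; exact hk this
      have k1 : PySem.Chars.startswith token ['k','i','n','d','_'] = false := hnot _ (by decide)
      have k2 : PySem.Chars.startswith token ['a','r','e','a','_'] = false := hnot _ (by decide)
      have k3 : PySem.Chars.startswith token ['p','r','i','o','r','i','t','y','_'] = false := hnot _ (by decide)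
      have k4 : PySem.Chars.startswith token ['c','o','m','p','o','n','e','n','t','_'] = false := hnot _ (by decide)
      simp [pvALoop, k1, k2, k3, k4]
  | true =>
      rw [if_pos rfl] at h1
      by_cases hin : key = "kind".toList ∨ key = "area".toList ∨
                     key = "priority".toList ∨ key = "component".toList
      · -- matched branch: the loop hits exactly the prefix key ++ "_"
        rcases hin with h | h | h | h <;> subst h <;> subst h1 <;>
          simp [pvALoop, PySem.Chars.startswith]
      · have hfalse : ∀ p : List Char, '_' ∉ p.dropLast → p.getLast? = some '_' →
            p.dropLast ≠ key → PySem.Chars.startswith token p = false :=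
          fun p a b c => startswith_key token rest key hk h1 p a b c
        have h1' : PySem.Chars.startswith token ['k','i','n','d','_'] = false :=
          hfalse _ (by decide) (by decide) (by intro h; apply hin; left; rw [← h]; rfl)
        have h2' : PySem.Chars.startswith token ['a','r','e','a','_'] = false :=
          hfalse _ (by decide) (by decide) (by intro h; apply hin; right; left; rw [← h]; rfl)
        have h3' : PySem.Chars.startswith token ['p','r','i','o','r','i','t','y','_'] = false :=
          hfalse _ (by decide) (by decide) (by intro h; apply hin; right; right; left; rw [← h]; rfl)
        have h4' : PySem.Chars.startswith token ['c','o','m','p','o','n','e','n','t','_'] = false :=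
          hfalse _ (by decide) (by decide) (by intro h; apply hin; right; right; right; rw [← h]; rfl)
        simp [pvALoop, h1', h2', h3', h4']
        exact fun hmem => absurd hmem hin

-- ===== VERDICT (by name: the statement is the Claim_ definition above) =====
theorem label_name_from_entity_py_spec : Claim_equal_label_name_from_entity_py := by
  intro entity_id _
  unfold Spec_label_name_from_entity_py label_name_from_entity_py label_name_from_entity_py_alt
  simp only [loop_eq_partition]
  split <;> rfl
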